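-- pv_equiv track=rewrite | github.com/ksullivan2/simple_games | kivy_yahtzee/ValueChecking.py | check_for_points
-- ===== SOURCE A (Python) =====
-- from collections import Counter
--
-- score_types = ["Aces","Twos","Threes","Fours","Fives","Sixes",
--          "Three of a Kind","Four of a Kind","Full House", "Small Straight",
--          "Large Straight", "Chance", "Yahtzee", "Yahtzee Bonus"]
--
-- def check_for_straight(array):
--     '''checks if the passed array is a straight'''
--     #hand is always sorted lowest to highest
--     for index, number in enumerate(array):
--         if index < len(array)-1:
--             if array[index + 1] - 1 != number:
--                 return False
--     return True
--
-- def remove_duplicate_dice(hand):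
--     '''removes duplicates from hand (helper method to check_for_straight)'''
--     no_dupes = list(set(hand))
--     #sets do not preserve order, so just in case
--     no_dupes.sort()
--     return no_dupes
--
-- def check_for_points(hand):
--     '''for the given hand, checks for any possible points'''
--     #does not care what the player has already used
--     possible_scores = {key: 0 for key in score_types}
--     for die in hand:
--         if die == 1:
--             possible_scores["Aces"] += 1
--         elif die == 2:
--             possible_scores["Twos"] += 2
--         elif die == 3:
--             possible_scores["Threes"] += 3
--         elif die == 4:
--             possible_scores["Fours"] += 4
--         elif die == 5:
--             possible_scores["Fives"] += 5
--         elif die == 6: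
--             possible_scores["Sixes"] += 6
--
--     total = sum(hand)
--     possible_scores["Chance"] = total
--
--     counter = Counter(hand).most_common(2)
--     #counter[0][1] is the count of the most common element
--
--     if counter[0][1] == 4:
--         possible_scores["Four of a Kind"] = total
--         possible_scores["Three of a Kind"] = total
--     elif counter[0][1] == 3:
--         possible_scores["Three of a Kind"] = total
--         if counter[1][1] == 2:
--             possible_scores["Full House"] = 25
--     elif counter[0][1] == 5:
--         possible_scores["Yahtzee"] = 50
--         possible_scores["Yahtzee Bonus"] = 100
--
--     no_dupes = remove_duplicate_dice(hand)
--
--     if check_for_straight(hand):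
--         possible_scores["Large Straight"] = 40
--         possible_scores["Small Straight"] = 30
--     elif len(no_dupes) == 4 and check_for_straight(no_dupes):
--         possible_scores["Small Straight"] = 30
--
--     return possible_scores
-- ===== SOURCE B (Python) =====
-- def check_for_points(hand):
--     '''for the given hand, checks for any possible points'''
--     total = sum(hand)
--     top = max(hand.count(v) for v in hand)  # empty hand: ValueError
--     values = set(hand)
--     one_triple = sum(1 for v in values if hand.count(v) == 3) == 1
--     has_pair = any(hand.count(v) == 2 for v in values)
--     large = all(v == hand[0] + i for i, v in enumerate(hand))
--     small = large or (len(values) == 4 and max(hand) - min(hand) == 3)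
--     names = ["Aces", "Twos", "Threes", "Fours", "Fives", "Sixes"]
--     scores = {name: hand.count(face) * face for face, name in enumerate(names, 1)}
--     scores["Three of a Kind"] = total if top in (3, 4) else 0
--     scores["Four of a Kind"] = total if top == 4 else 0
--     scores["Full House"] = 25 if top == 3 and one_triple and has_pair else 0
--     scores["Small Straight"] = 30 if small else 0
--     scores["Large Straight"] = 40 if large else 0
--     scores["Chance"] = total
--     scores["Yahtzee"] = 50 if top == 5 else 0
--     scores["Yahtzee Bonus"] = 100 if top == 5 else 0
--     return scores
-- ===== Notes on version B (the rewrite author's own statement) =====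
-- stated objective: alternative
-- what changed: B drops Counter/most_common/sorting entirely: it scores each category by direct per-value count queries and arithmetic characterizations (top kind = max of hand.count over the hand, full house = exactly one triple plus some pair, large straight = each die equals hand[0]+index, small straight = 4 distinct values spanning max-min==3), where A mutates a pre-zeroed dict with a per-die if/elif chain, most_common(2) indexing and adjacent-difference scans over the hand and its sorted deduplication.
-- outside the precondition, e.g. on check_for_points([]): A raises IndexError, B raises ValueError
import Mathlib
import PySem

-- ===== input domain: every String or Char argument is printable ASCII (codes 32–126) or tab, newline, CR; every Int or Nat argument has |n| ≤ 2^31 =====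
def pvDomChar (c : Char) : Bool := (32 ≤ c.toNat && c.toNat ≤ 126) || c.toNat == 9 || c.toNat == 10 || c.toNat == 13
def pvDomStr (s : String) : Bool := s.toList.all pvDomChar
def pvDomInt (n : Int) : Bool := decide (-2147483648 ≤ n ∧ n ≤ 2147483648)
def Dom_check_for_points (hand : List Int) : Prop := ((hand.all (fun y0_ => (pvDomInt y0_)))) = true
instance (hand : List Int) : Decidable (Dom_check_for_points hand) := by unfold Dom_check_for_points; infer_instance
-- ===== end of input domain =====

-- B computes each category directly from per-value counts and arithmetic span tests (no Counter,
-- no sorting, no most_common); equivalence of return values is proved on hands where A returns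
-- (A raises IndexError on [] and on [x,x,x], and B returns the natural scores on [x,x,x]).

-- ===== PORT A =====
def score_types : List String :=
  ["Aces","Twos","Threes","Fours","Fives","Sixes",
   "Three of a Kind","Four of a Kind","Full House","Small Straight",
   "Large Straight","Chance","Yahtzee","Yahtzee Bonus"]

-- the enumerate loop of check_for_straight, with Python's early `return False`
def check_for_straight_go (array : List Int) : List (Int × Int) → Bool
  | [] => true
  | (index, number) :: rest =>
    if index < (array.length : Int) - 1 then
      -- array[index + 1] is in range here, so pyGetD is exact
      if PySem.List.pyGetD array (index + 1) 0 - 1 != number then false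
      else check_for_straight_go array rest
    else check_for_straight_go array rest

def check_for_straight (array : List Int) : Bool :=
  check_for_straight_go array (PySem.List.enumerate array)

-- list(set(hand)) followed by .sort(): the sort makes the unspecified set order irrelevant
def remove_duplicate_dice (hand : List Int) : List Int :=
  PySem.List.sorted (PySem.Set.ofList hand) (fun x => x) false

def check_for_points (hand : List Int) : List (String × Int) :=
  let possible0 : PySem.Dict String Int :=
    score_types.foldl (fun d k => d.insert k 0) PySem.Dict.empty
  let possible1 := hand.foldl (fun d die =>
    if die == 1 then d.modify "Aces" 0 (· + 1)
    else if die == 2 then d.modify "Twos" 0 (· + 2)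
    else if die == 3 then d.modify "Threes" 0 (· + 3)
    else if die == 4 then d.modify "Fours" 0 (· + 4)
    else if die == 5 then d.modify "Fives" 0 (· + 5)
    else if die == 6 then d.modify "Sixes" 0 (· + 6)
    else d) possible0
  let total := hand.sum
  let possible2 := possible1.insert "Chance" total
  -- Counter(hand).most_common(2): counter items stably sorted by count descending, first two
  let counter := (PySem.List.sorted (PySem.Dict.counter hand).items (fun p => p.2) true).take 2
  let possible3? : Option (PySem.Dict String Int) :=
    match PySem.List.pyGet? counter 0 with
    | none => none       -- IndexError on the empty hand (outside Pre_)
    | some c0 =>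
      if c0.2 == 4 then
        some ((possible2.insert "Four of a Kind" total).insert "Three of a Kind" total)
      else if c0.2 == 3 then
        match PySem.List.pyGet? counter 1 with
        | none => none   -- IndexError on hand = [x, x, x] (outside Pre_)
        | some c1 =>
          some (if c1.2 == 2 then
                  (possible2.insert "Three of a Kind" total).insert "Full House" 25
                else possible2.insert "Three of a Kind" total)
      else if c0.2 == 5 then
        some ((possible2.insert "Yahtzee" 50).insert "Yahtzee Bonus" 100)
      else some possible2
  match possible3? with
  | none => []
  | some possible3 =>
    let no_dupes := remove_duplicate_dice hand
    let possible4 :=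
      if check_for_straight hand then
        (possible3.insert "Large Straight" 40).insert "Small Straight" 30
      else if no_dupes.length == 4 && check_for_straight no_dupes then
        possible3.insert "Small Straight" 30
      else possible3
    possible4.items

-- ===== PORT B =====
def pvNames : List String := ["Aces","Twos","Threes","Fours","Fives","Sixes"]

def check_for_points_alt (hand : List Int) : List (String × Int) :=
  let total := hand.sum
  -- max(hand.count(v) for v in hand); ValueError on the empty hand (outside Pre_)
  match PySem.List.max? (hand.map (fun v => (hand.count v : Int))) (fun x => x) with
  | none => []
  | some top =>
    let values := PySem.Set.ofList hand
    -- sum(1 for v in values if hand.count(v) == 3) == 1, i.e. a countP over the set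
    let one_triple := (values.countP (fun v => (hand.count v : Int) == 3) : Int) == 1
    let has_pair := values.any (fun v => (hand.count v : Int) == 2)
    -- all(v == hand[0] + i for i, v in enumerate(hand)); hand[0] only read when hand nonempty
    let large := (PySem.List.enumerate hand).all (fun p => p.2 == PySem.List.pyGetD hand 0 0 + p.1)
    -- max(hand)/min(hand) are only consulted behind the `values.length == 4` guard (hand nonempty there)
    let small := large || ((values.length == 4) &&
      ((PySem.List.max? hand (fun x => x)).getD 0 - (PySem.List.min? hand (fun x => x)).getD 0 == 3))
    let scores := (PySem.List.enumerate pvNames 1).foldl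
      (fun d p => d.insert p.2 ((hand.count p.1 : Int) * p.1)) PySem.Dict.empty
    (((((((scores.insert "Three of a Kind" (if top == 3 || top == 4 then total else 0)).insert
      "Four of a Kind" (if top == 4 then total else 0)).insert
      "Full House" (if top == 3 && one_triple && has_pair then 25 else 0)).insert
      "Small Straight" (if small then 30 else 0)).insert
      "Large Straight" (if large then 40 else 0)).insert
      "Chance" total).insert
      "Yahtzee" (if top == 5 then 50 else 0)).insert
      "Yahtzee Bonus" (if top == 5 then 100 else 0) |>.items

-- ===== PRECONDITION & SPEC =====
-- Pre_ excludes exactly the hands on which the Python A raises IndexError: the empty hand and a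
-- hand of exactly three equal dice (its Counter has fewer than 2 entries); B raises on [] too but
-- returns the natural scores on [x,x,x].
def Pre_check_for_points (hand : List Int) : Prop :=
  hand ≠ [] ∧ ∀ x ∈ hand, hand ≠ [x, x, x]
instance (hand : List Int) : Decidable (Pre_check_for_points hand) := by
  unfold Pre_check_for_points; infer_instance
def pvWitness_check_for_points : List Int := ([1, 2, 3, 4, 5])

def Spec_check_for_points (hand : List Int) (out : List (String × Int)) : Prop := out = check_for_points_alt hand
instance (hand : List Int) (out : List (String × Int)) : Decidable (Spec_check_for_points hand out) := by unfold Spec_check_for_points; infer_instance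

-- ===== CLAIM (what is proved, stated in full; the proofs are below) =====
def Claim_equal_check_for_points : Prop := ∀ (hand : List Int), Dom_check_for_points hand → Pre_check_for_points hand → Spec_check_for_points hand (check_for_points hand)

-- ===== LEMMAS AND PROOFS =====

def pvTbl (a1 a2 a3 a4 a5 a6 t3 t4 fh ss ls ch yz yb : Int) : PySem.Dict String Int :=
  PySem.Dict.mk [("Aces", a1), ("Twos", a2), ("Threes", a3), ("Fours", a4), ("Fives", a5),
    ("Sixes", a6), ("Three of a Kind", t3), ("Four of a Kind", t4), ("Full House", fh),
    ("Small Straight", ss), ("Large Straight", ls), ("Chance", ch), ("Yahtzee", yz),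
    ("Yahtzee Bonus", yb)]

-- the canonical "ascending run" predicate both straight tests reduce to
def pvChain : List Int → Bool
  | [] => true
  | [_] => true
  | x :: y :: t => (y - 1 == x) && pvChain (y :: t)

-- "the list is a, a+1, a+2, ..." — what B's offset test computes
def pvFrom : Int → List Int → Bool
  | _, [] => true
  | a, x :: t => (x == a) && pvFrom (a + 1) t

theorem pv_go_spec (l : List Int) : ∀ (array : List Int) (k : Nat), array.drop k = l →
    check_for_straight_go array (PySem.List.enumerate l (k : Int)) = pvChain l := by
  induction l with
  | nil => intro array k h; rfl
  | cons x rest ih =>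
    intro array k hdrop
    have hk : k < array.length := by
      by_contra hge
      rw [List.drop_eq_nil_of_le (by omega)] at hdrop
      exact List.cons_ne_nil x rest hdrop.symm
    have hlen : array.length - k = rest.length + 1 := by
      have := congrArg List.length hdrop
      simp [List.length_drop] at this
      omega
    rw [PySem.List.enumerate_cons]
    rw [check_for_straight_go]
    cases rest with
    | nil =>
      rw [if_neg (by simp only [List.length_nil] at hlen; push_cast; omega)]
      rfl
    | cons y t =>
      rw [if_pos (by simp only [List.length_cons] at hlen; push_cast; omega)]
      have h2 : array.drop (k + 1) = y :: t := by
        have h3 : (array.drop k).drop 1 = array.drop (k + 1) := by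
          rw [List.drop_drop]
        rw [← h3, hdrop]
        rfl
      have hy : PySem.List.pyGetD array ((k : Int) + 1) 0 = y := by
        rw [show ((k : Int) + 1) = ((k + 1 : Nat) : Int) by push_cast; ring]
        rw [PySem.List.pyGetD_natCast]
        rw [List.getD_eq_getElem?_getD]
        rw [show array[k+1]? = (array.drop (k+1))[0]? by rw [List.getElem?_drop]]
        rw [h2]
        rfl
      rw [hy]
      cases hbe : (y - 1 == x) with
      | false =>
        rw [if_pos (by simp [bne, hbe])]
        show false = ((y - 1 == x) && pvChain (y :: t))
        rw [hbe, Bool.false_and]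
      | true =>
        rw [if_neg (by simp [bne, hbe])]
        show check_for_straight_go array (PySem.List.enumerate (y :: t) ((k : Int) + 1)) = _
        have := ih array (k + 1) h2
        rw [show ((k : Int) + 1) = ((k + 1 : Nat) : Int) by push_cast; ring]
        rw [this]
        show pvChain (y :: t) = ((y - 1 == x) && pvChain (y :: t))
        rw [hbe, Bool.true_and]

theorem pv_straight_eq_chain (l : List Int) : check_for_straight l = pvChain l := by
  have := pv_go_spec l l 0 (by simp)
  simpa [check_for_straight] using this

theorem pv_allFrom (t : List Int) : ∀ (b i : Int),
    (PySem.List.enumerate t i).all (fun p => p.2 == b + p.1) = pvFrom (b + i) t := by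
  induction t with
  | nil => intro b i; rfl
  | cons x s ih =>
    intro b i
    rw [PySem.List.enumerate_cons, List.all_cons]
    show ((x == b + i) && _) = _
    rw [ih b (i + 1), pvFrom, show b + (i + 1) = (b + i) + 1 by ring]

theorem pv_chain_from : ∀ (t : List Int) (x : Int), pvChain (x :: t) = pvFrom (x + 1) t := by
  intro t
  induction t with
  | nil => intro x; rfl
  | cons y s ih =>
    intro x
    show ((y - 1 == x) && pvChain (y :: s)) = ((y == x + 1) && pvFrom (x + 1 + 1) s)
    by_cases h : y = x + 1
    · subst h
      simp only [ih]
      simp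
    · have h1 : (y - 1 == x) = false := by simp; omega
      have h2 : (y == x + 1) = false := by simp; omega
      rw [h1, h2, Bool.false_and, Bool.false_and]

theorem pv_largeB (hand : List Int) :
    ((PySem.List.enumerate hand).all (fun p => p.2 == PySem.List.pyGetD hand 0 0 + p.1))
      = pvChain hand := by
  cases hand with
  | nil => rfl
  | cons x t =>
    have h0 : PySem.List.pyGetD (x :: t) 0 0 = x := by
      simp [PySem.List.pyGetD, PySem.List.pyIdx?]
    rw [h0, PySem.List.enumerate_cons, List.all_cons]
    show ((x == x + 0) && (PySem.List.enumerate t (0 + 1)).all (fun p => p.2 == x + p.1)) = _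
    rw [show ((0 : Int) + 1) = 1 from rfl, pv_allFrom t x 1, pv_chain_from]
    simp

theorem pv_smallB (hand : List Int) (hne : hand ≠ []) :
    (((remove_duplicate_dice hand).length == 4) && pvChain (remove_duplicate_dice hand))
      = (((PySem.Set.ofList hand).length == 4) &&
         ((PySem.List.max? hand (fun x => x)).getD 0 - (PySem.List.min? hand (fun x => x)).getD 0 == 3)) := by
  have hlen : (remove_duplicate_dice hand).length = (PySem.Set.ofList hand).length :=
    PySem.List.length_sorted _ _ _
  by_cases h4 : (PySem.Set.ofList hand).length = 4
  · have hpw : List.Pairwise (fun x1 x2 => x1 < x2) (remove_duplicate_dice hand) :=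
      PySem.List.sorted_ofList_pairwise_lt hand
    have hmem : ∀ y, y ∈ remove_duplicate_dice hand ↔ y ∈ hand := by
      intro y
      rw [remove_duplicate_dice, PySem.List.mem_sorted, PySem.Set.mem_ofList]
    rw [hlen, h4]
    have hlen4 : (remove_duplicate_dice hand).length = 4 := by rw [hlen, h4]
    obtain ⟨M, hmx⟩ : ∃ M, PySem.List.max? hand (fun x => x) = some M := by
      cases hx : PySem.List.max? hand (fun x => x) with
      | none => exact absurd ((PySem.List.max?_eq_none_iff _ _).mp hx) hne
      | some M => exact ⟨M, rfl⟩
    obtain ⟨m, hmn⟩ : ∃ m, PySem.List.min? hand (fun x => x) = some m := by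
      cases hx : PySem.List.min? hand (fun x => x) with
      | none => exact absurd ((PySem.List.min?_eq_none_iff _ _).mp hx) hne
      | some m => exact ⟨m, rfl⟩
    rw [hmx, hmn]
    rcases hnd : remove_duplicate_dice hand with _ | ⟨a, _ | ⟨b, _ | ⟨c, _ | ⟨d, _ | ⟨e, tl⟩⟩⟩⟩⟩ <;>
      rw [hnd] at hlen4 <;> simp at hlen4
    rw [hnd] at hpw hmem
    simp only [List.pairwise_cons, List.mem_cons, List.not_mem_nil] at hpw
    have hab : a < b := by tauto
    have hbc : b < c := by tauto
    have hcd : c < d := by tauto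
    have hMd : M = d := by
      have h1 : M ∈ hand := PySem.List.max?_mem hmx
      have h2 : M ≤ d := by
        have := (hmem M).mpr h1
        simp only [List.mem_cons, List.not_mem_nil, or_false] at this
        rcases this with rfl | rfl | rfl | rfl <;> omega
      have h3 : d ≤ M := PySem.List.max?_isMax hmx d ((hmem d).mp (by simp))
      omega
    have hma : m = a := by
      have h1 : m ∈ hand := PySem.List.min?_mem hmn
      have h2 : a ≤ m := by
        have := (hmem m).mpr h1
        simp only [List.mem_cons, List.not_mem_nil, or_false] at this
        rcases this with rfl | rfl | rfl | rfl <;> omega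
      have h3 : m ≤ a := PySem.List.min?_isMin hmn a ((hmem a).mp (by simp))
      omega
    subst hMd hma
    rw [Bool.eq_iff_iff]
    simp [pvChain]
    omega
  · have h1 : ((remove_duplicate_dice hand).length == 4) = false := by
      rw [hlen]; simpa using h4
    have h2 : ((PySem.Set.ofList hand).length == 4) = false := by simpa using h4
    rw [h1, h2, Bool.false_and, Bool.false_and]

theorem pv_faceFold (hand : List Int) : ∀ (v1 v2 v3 v4 v5 v6 : Int),
    hand.foldl (fun d die =>
      if die == 1 then d.modify "Aces" 0 (· + 1)
      else if die == 2 then d.modify "Twos" 0 (· + 2)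
      else if die == 3 then d.modify "Threes" 0 (· + 3)
      else if die == 4 then d.modify "Fours" 0 (· + 4)
      else if die == 5 then d.modify "Fives" 0 (· + 5)
      else if die == 6 then d.modify "Sixes" 0 (· + 6)
      else d) (pvTbl v1 v2 v3 v4 v5 v6 0 0 0 0 0 0 0 0) =
    pvTbl (v1 + (hand.count 1 : Int)) (v2 + 2 * (hand.count 2 : Int))
      (v3 + 3 * (hand.count 3 : Int)) (v4 + 4 * (hand.count 4 : Int))
      (v5 + 5 * (hand.count 5 : Int)) (v6 + 6 * (hand.count 6 : Int)) 0 0 0 0 0 0 0 0 := by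
  induction hand with
  | nil => intro v1 v2 v3 v4 v5 v6; simp
  | cons die t ih =>
    intro v1 v2 v3 v4 v5 v6
    rw [List.foldl_cons]
    by_cases h1 : die = 1
    · subst h1
      change t.foldl _ (pvTbl (v1 + 1) v2 v3 v4 v5 v6 0 0 0 0 0 0 0 0) = _
      rw [ih]; simp [pvTbl]; omega
    by_cases h2 : die = 2
    · subst h2
      change t.foldl _ (pvTbl v1 (v2 + 2) v3 v4 v5 v6 0 0 0 0 0 0 0 0) = _
      rw [ih]; simp [pvTbl, h1]; omega
    by_cases h3 : die = 3
    · subst h3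
      change t.foldl _ (pvTbl v1 v2 (v3 + 3) v4 v5 v6 0 0 0 0 0 0 0 0) = _
      rw [ih]; simp [pvTbl, h1, h2]; omega
    by_cases h4 : die = 4
    · subst h4
      change t.foldl _ (pvTbl v1 v2 v3 (v4 + 4) v5 v6 0 0 0 0 0 0 0 0) = _
      rw [ih]; simp [pvTbl, h1, h2, h3]; omega
    by_cases h5 : die = 5
    · subst h5
      change t.foldl _ (pvTbl v1 v2 v3 v4 (v5 + 5) v6 0 0 0 0 0 0 0 0) = _
      rw [ih]; simp [pvTbl, h1, h2, h3, h4]; omega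
    by_cases h6 : die = 6
    · subst h6
      change t.foldl _ (pvTbl v1 v2 v3 v4 v5 (v6 + 6) 0 0 0 0 0 0 0 0) = _
      rw [ih]; simp [pvTbl, h1, h2, h3, h4, h5]; omega
    · have hstep : (if die == 1 then (pvTbl v1 v2 v3 v4 v5 v6 0 0 0 0 0 0 0 0).modify "Aces" 0 (· + 1)
          else if die == 2 then (pvTbl v1 v2 v3 v4 v5 v6 0 0 0 0 0 0 0 0).modify "Twos" 0 (· + 2)
          else if die == 3 then (pvTbl v1 v2 v3 v4 v5 v6 0 0 0 0 0 0 0 0).modify "Threes" 0 (· + 3)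
          else if die == 4 then (pvTbl v1 v2 v3 v4 v5 v6 0 0 0 0 0 0 0 0).modify "Fours" 0 (· + 4)
          else if die == 5 then (pvTbl v1 v2 v3 v4 v5 v6 0 0 0 0 0 0 0 0).modify "Fives" 0 (· + 5)
          else if die == 6 then (pvTbl v1 v2 v3 v4 v5 v6 0 0 0 0 0 0 0 0).modify "Sixes" 0 (· + 6)
          else (pvTbl v1 v2 v3 v4 v5 v6 0 0 0 0 0 0 0 0)) = pvTbl v1 v2 v3 v4 v5 v6 0 0 0 0 0 0 0 0 := by
        simp [h1, h2, h3, h4, h5, h6]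
      rw [hstep, ih]
      simp [pvTbl, h1, h2, h3, h4, h5, h6]

theorem pv_ins_ch (a1 a2 a3 a4 a5 a6 t3 t4 fh ss ls ch yz yb x : Int) :
    (pvTbl a1 a2 a3 a4 a5 a6 t3 t4 fh ss ls ch yz yb).insert "Chance" x = pvTbl a1 a2 a3 a4 a5 a6 t3 t4 fh ss ls x yz yb := rfl
theorem pv_ins_t3 (a1 a2 a3 a4 a5 a6 t3 t4 fh ss ls ch yz yb x : Int) :
    (pvTbl a1 a2 a3 a4 a5 a6 t3 t4 fh ss ls ch yz yb).insert "Three of a Kind" x = pvTbl a1 a2 a3 a4 a5 a6 x t4 fh ss ls ch yz yb := rfl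
theorem pv_ins_t4 (a1 a2 a3 a4 a5 a6 t3 t4 fh ss ls ch yz yb x : Int) :
    (pvTbl a1 a2 a3 a4 a5 a6 t3 t4 fh ss ls ch yz yb).insert "Four of a Kind" x = pvTbl a1 a2 a3 a4 a5 a6 t3 x fh ss ls ch yz yb := rfl
theorem pv_ins_fh (a1 a2 a3 a4 a5 a6 t3 t4 fh ss ls ch yz yb x : Int) :
    (pvTbl a1 a2 a3 a4 a5 a6 t3 t4 fh ss ls ch yz yb).insert "Full House" x = pvTbl a1 a2 a3 a4 a5 a6 t3 t4 x ss ls ch yz yb := rfl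
theorem pv_ins_ss (a1 a2 a3 a4 a5 a6 t3 t4 fh ss ls ch yz yb x : Int) :
    (pvTbl a1 a2 a3 a4 a5 a6 t3 t4 fh ss ls ch yz yb).insert "Small Straight" x = pvTbl a1 a2 a3 a4 a5 a6 t3 t4 fh x ls ch yz yb := rfl
theorem pv_ins_ls (a1 a2 a3 a4 a5 a6 t3 t4 fh ss ls ch yz yb x : Int) :
    (pvTbl a1 a2 a3 a4 a5 a6 t3 t4 fh ss ls ch yz yb).insert "Large Straight" x = pvTbl a1 a2 a3 a4 a5 a6 t3 t4 fh ss x ch yz yb := rfl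
theorem pv_ins_yz (a1 a2 a3 a4 a5 a6 t3 t4 fh ss ls ch yz yb x : Int) :
    (pvTbl a1 a2 a3 a4 a5 a6 t3 t4 fh ss ls ch yz yb).insert "Yahtzee" x = pvTbl a1 a2 a3 a4 a5 a6 t3 t4 fh ss ls ch x yb := rfl
theorem pv_ins_yb (a1 a2 a3 a4 a5 a6 t3 t4 fh ss ls ch yz yb x : Int) :
    (pvTbl a1 a2 a3 a4 a5 a6 t3 t4 fh ss ls ch yz yb).insert "Yahtzee Bonus" x = pvTbl a1 a2 a3 a4 a5 a6 t3 t4 fh ss ls ch yz x := rfl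

set_option maxHeartbeats 1000000 in
theorem pv_init_eq : score_types.foldl (fun d k => d.insert k (0:Int)) PySem.Dict.empty = pvTbl 0 0 0 0 0 0 0 0 0 0 0 0 0 0 := rfl

set_option maxHeartbeats 1000000 in
theorem pv_scoresB (hand : List Int) (t3 t4 fh ss ls ch yz yb : Int) :
    ((((((((((PySem.List.enumerate pvNames 1).foldl (fun d p => d.insert p.2 ((hand.count p.1 : Int) * p.1)) PySem.Dict.empty).insert "Three of a Kind" t3).insert "Four of a Kind" t4).insert "Full House" fh).insert "Small Straight" ss).insert "Large Straight" ls).insert "Chance" ch).insert "Yahtzee" yz).insert "Yahtzee Bonus" yb) =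
    pvTbl ((hand.count 1 : Int) * 1) ((hand.count 2 : Int) * 2) ((hand.count 3 : Int) * 3)
      ((hand.count 4 : Int) * 4) ((hand.count 5 : Int) * 5) ((hand.count 6 : Int) * 6)
      t3 t4 fh ss ls ch yz yb := by
  rw [show PySem.List.enumerate pvNames 1 =
      [((1:Int),"Aces"),(2,"Twos"),(3,"Threes"),(4,"Fours"),(5,"Fives"),(6,"Sixes")] from rfl]
  simp only [List.foldl_cons, List.foldl_nil]
  simp [PySem.Dict.insert, PySem.Dict.contains, PySem.Dict.empty, pvTbl]

theorem pv_get0 {a : Type} (x : a) (l : List a) : PySem.List.pyGet? (x :: l) (0:Int) = some x := by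
  simp [PySem.List.pyGet?, PySem.List.pyIdx?]

theorem pv_get1 {a : Type} (x y : a) (l : List a) : PySem.List.pyGet? (x :: y :: l) (1:Int) = some y := by
  simp [PySem.List.pyGet?, PySem.List.pyIdx?]

set_option maxHeartbeats 3200000 in
theorem pv_ports_agree (hand : List Int) (hpre : Pre_check_for_points hand) :
    check_for_points hand = check_for_points_alt hand := by
  obtain ⟨hne, hnot3⟩ := hpre
  obtain ⟨x0, hx0⟩ : ∃ x, x ∈ hand := List.exists_mem_of_ne_nil hand hne
  have hperm := PySem.List.sorted_perm (PySem.Dict.counter hand).items (fun p : Int × Int => p.2) true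
  have hpw := PySem.List.sorted_pairwise_rev (PySem.Dict.counter hand).items (fun p : Int × Int => p.2)
  simp only [check_for_points, check_for_points_alt]
  rw [pv_init_eq, pv_faceFold, pv_ins_ch]
  generalize hmsl : PySem.List.sorted (PySem.Dict.counter hand).items (fun p : Int × Int => p.2) true = ms at hperm hpw ⊢
  rw [PySem.Dict.items_counter] at hperm
  -- the sorted counter items can not be empty
  cases ms with
  | nil =>
    exfalso
    have h1 : (PySem.Set.ofList hand).map (fun k => (k, (List.count k hand : Int))) = [] :=
      hperm.symm.eq_nil
    have h2 : PySem.Set.ofList hand = [] := by simpa using h1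
    have := (PySem.Set.mem_ofList hand x0).mpr hx0
    rw [h2] at this
    exact List.not_mem_nil this
  | cons a rest =>
    obtain ⟨k0, hk0D, hk0⟩ := List.mem_map.mp (hperm.subset (List.mem_cons_self))
    have hdom : ∀ p ∈ a :: rest, p.2 ≤ a.2 := by
      intro p hp
      rcases List.mem_cons.mp hp with rfl | hp
      · exact le_refl _
      · exact (List.pairwise_cons.mp hpw).1 p hp
    -- B's top is the head count of the sorted items
    obtain ⟨M, hmx⟩ : ∃ M, PySem.List.max? (hand.map (fun v => (hand.count v : Int))) (fun x => x) = some M := by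
      cases hx : PySem.List.max? (hand.map (fun v => (hand.count v : Int))) (fun x => x) with
      | none =>
        exact absurd ((PySem.List.max?_eq_none_iff _ _).mp hx) (by simpa using hne)
      | some M => exact ⟨M, rfl⟩
    have hMtop : M = a.2 := by
      have h1 := PySem.List.max?_mem hmx
      obtain ⟨v, hv, hveq⟩ := List.mem_map.mp h1
      have h2 : M ≤ a.2 := by
        have hvD : v ∈ PySem.Set.ofList hand := (PySem.Set.mem_ofList hand v).mpr hv
        have : (v, (List.count v hand : Int)) ∈ a :: rest :=
          hperm.mem_iff.mpr (List.mem_map.mpr ⟨v, hvD, rfl⟩)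
        have := hdom _ this
        simp only at this
        omega
      have h3 : a.2 ≤ M := by
        have hk0h : k0 ∈ hand := (PySem.Set.mem_ofList hand k0).mp hk0D
        have : (hand.count k0 : Int) ∈ hand.map (fun v => (hand.count v : Int)) :=
          List.mem_map.mpr ⟨k0, hk0h, rfl⟩
        have := PySem.List.max?_isMax hmx _ this
        rw [← hk0]
        simpa using this
      omega
    subst hMtop
    simp only [hmx]
    -- A's counter[0]
    rw [show (a :: rest).take 2 = a :: rest.take 1 from rfl]
    simp only [pv_get0]
    simp only [pv_largeB, pv_straight_eq_chain, pv_smallB hand hne]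
    by_cases ha4 : a.2 = 4
    · have e4 : (a.2 == 4) = true := by simp [ha4]
      have e34 : (a.2 == 3 || a.2 == 4) = true := by simp [ha4]
      have e5 : (a.2 == 5) = false := by simp [ha4]
      simp [e4, e34, e5]
      rw [pv_ins_t4, pv_ins_t3, pv_scoresB hand]
      try simp only [pv_ins_ls, pv_ins_ss]
      clear hmsl hperm hpw hdom hmx hk0 hk0D hx0 hnot3
      split_ifs <;> (try simp_all [pv_ins_ls, pv_ins_ss]) <;> simp_all [pvTbl] <;> try omega
    · by_cases ha3 : a.2 = 3
      · -- the three-of-a-kind branch: A consults counter[1]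
        cases rest with
        | nil =>
          -- Counter(hand) has a single entry of count 3: hand = [k, k, k], excluded by Pre_
          exfalso
          have h1 : (PySem.Set.ofList hand).map (fun k => (k, (List.count k hand : Int))) = [a] :=
            List.perm_singleton.mp hperm.symm
          obtain ⟨k, hk, hrest⟩ : ∃ k ks, PySem.Set.ofList hand = k :: ks := by
            cases hD : PySem.Set.ofList hand with
            | nil => rw [hD] at h1; simp at h1
            | cons k ks => exact ⟨k, ks, rfl⟩
          rw [hrest] at h1
          simp only [List.map_cons, List.cons.injEq, List.map_eq_nil_iff] at h1
          obtain ⟨hfk, hks⟩ := h1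
          have hcnt3 : List.count k hand = 3 := by
            have := congrArg Prod.snd hfk
            simp only at this
            rw [ha3] at this
            omega
          have hallk : ∀ b ∈ hand, k = b := by
            intro b hb
            have : b ∈ PySem.Set.ofList hand := (PySem.Set.mem_ofList hand b).mpr hb
            rw [hrest, hks] at this
            simp only [List.mem_cons, List.not_mem_nil, or_false] at this
            omega
          have hlen3 : hand.length = 3 := by
            rw [← List.count_eq_length.mpr hallk, hcnt3]
          have hhand : hand = [k, k, k] := by
            have : hand = List.replicate 3 k := by
              rw [List.eq_replicate_iff]
              exact ⟨hlen3, fun b hb => (hallk b hb).symm⟩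
            simpa using this
          have hkmem : k ∈ hand := by
            rw [hhand]; simp
          exact hnot3 k hkmem hhand
        | cons b r =>
          have e4 : (a.2 == 4) = false := by simp [ha4]
          have e3 : (a.2 == 3) = true := by simp [ha3]
          have e34 : (a.2 == 3 || a.2 == 4) = true := by simp [ha3]
          have e5 : (a.2 == 5) = false := by simp [ha3]
          simp [e4, e3, e34, e5]
          try simp only [show List.take 1 (b :: r) = [b] from rfl, pv_get1]
          -- A's Full-House test counter[1][1] == 2, in terms of B's counts
          have hcnt : ((a :: b :: r).countP (fun p => p.2 == 3))
              = (PySem.Set.ofList hand).countP (fun v => ((hand.count v : Int) == 3)) := by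
            rw [hperm.countP_eq, List.countP_map]
            rfl
          have hsplit : (a :: b :: r).countP (fun p => p.2 == 3)
              = (r.countP (fun p => p.2 == 3) + (if b.2 == 3 then 1 else 0))
                + (if a.2 == 3 then 1 else 0) := by
            simp [List.countP_cons]
          have hba : b.2 ≤ a.2 := (List.pairwise_cons.mp hpw).1 b (by simp)
          have hrb : ∀ p ∈ r, p.2 ≤ b.2 :=
            (List.pairwise_cons.mp (List.pairwise_cons.mp hpw).2).1
          have hfh : (b.2 = 2) ↔
              ((PySem.Set.ofList hand).countP (fun v => ((hand.count v : Int) == 3)) = 1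
               ∧ ∃ x ∈ hand, (hand.count x : Int) = 2) := by
            constructor
            · intro hb2
              constructor
              · rw [← hcnt, hsplit]
                have h0 : r.countP (fun p => p.2 == 3) = 0 := List.countP_eq_zero.mpr (by
                  intro p hp
                  have := hrb p hp
                  simp only [beq_iff_eq]
                  omega)
                simp [h0, ha3, hb2]
              · obtain ⟨kb, hkbD, hkbeq⟩ :=
                  List.mem_map.mp (hperm.subset (by simp : b ∈ a :: b :: r))
                refine ⟨kb, (PySem.Set.mem_ofList hand kb).mp hkbD, ?_⟩
                have := congrArg Prod.snd hkbeq
                simp only at this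
                omega
            · rintro ⟨h1, x, hx, hx2⟩
              rw [← hcnt, hsplit] at h1
              by_cases hb3 : b.2 = 3
              · simp [hb3, ha3] at h1
              · have hx2' : (x, (hand.count x : Int)) ∈ a :: b :: r :=
                  hperm.mem_iff.mpr
                    (List.mem_map.mpr ⟨x, (PySem.Set.mem_ofList hand x).mpr hx, rfl⟩)
                rcases List.mem_cons.mp hx2' with heq | hx2''
                · have := congrArg Prod.snd heq.symm
                  simp only at this
                  omega
                · rcases List.mem_cons.mp hx2'' with heq | hinr
                  · have := congrArg Prod.snd heq.symm
                    simp only at this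
                    omega
                  · have := hrb _ hinr
                    simp only at this
                    omega
          simp only [pv_ins_t3, pv_ins_fh, pv_scoresB hand]
          try simp only [pv_ins_ls, pv_ins_ss]
          clear hmsl hperm hpw hdom hmx hk0 hk0D hx0 hnot3 hcnt hsplit
          split_ifs <;> (try simp_all [pv_ins_ls, pv_ins_ss]) <;> simp_all [pvTbl] <;> try omega
      · by_cases ha5 : a.2 = 5
        · have e4 : (a.2 == 4) = false := by simp [ha5]
          have e3 : (a.2 == 3) = false := by simp [ha5]
          have e34 : (a.2 == 3 || a.2 == 4) = false := by simp [ha5]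
          have e5 : (a.2 == 5) = true := by simp [ha5]
          simp [e4, e3, e34, e5]
          rw [pv_ins_yz, pv_ins_yb]
          simp only [pv_scoresB hand]
          try simp only [pv_ins_ls, pv_ins_ss]
          clear hmsl hperm hpw hdom hmx hk0 hk0D hx0 hnot3
          split_ifs <;> (try simp_all [pv_ins_ls, pv_ins_ss]) <;> simp_all [pvTbl] <;> try omega
        · have e4 : (a.2 == 4) = false := by simp [ha4]
          have e3 : (a.2 == 3) = false := by simp [ha3]
          have e34 : (a.2 == 3 || a.2 == 4) = false := by simp [ha3, ha4]
          have e5 : (a.2 == 5) = false := by simp [ha5]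
          simp [e4, e3, e34, e5]
          simp only [pv_scoresB hand]
          try simp only [pv_ins_ls, pv_ins_ss]
          clear hmsl hperm hpw hdom hmx hk0 hk0D hx0 hnot3
          split_ifs <;> (try simp_all [pv_ins_ls, pv_ins_ss]) <;> simp_all [pvTbl] <;> try omega

-- ===== VERDICT (by name: the statement is the Claim_ definition above) =====
theorem check_for_points_spec : Claim_equal_check_for_points := by
  intro hand _ hpre
  unfold Spec_check_for_points
  exact pv_ports_agree hand hpre
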